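-- pv_equiv track=rewrite | github.com/ryurongliu/bioinformatics | fold_enrichment_plotting/plot.py | sliding_window_mask
-- ===== SOURCE A (Python) =====
-- def sliding_window_mask(data, cutoff, size=3):
--
--     #for window of size centered on datapoint - if all datapoints in window are > cutoff, retain datapoint
--     #else, remove datapoint (set to 0)
--
--     lookback = int(size/2) #number of points to look on either side of current datapoint
--
--     masked = data.copy()
--     for i in range(lookback): #set beginning and endpoints to 0
--         masked[i] = 0
--         masked[-i-1] = 0
--
--     for i in range(lookback, len(data) - lookback):
--         window = data[i-lookback: i+lookback+1]
--
--         if not all(x >= cutoff for x in window):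
--             masked[i] = 0
--
--     return masked
-- ===== SOURCE B (Python) =====
-- def sliding_window_mask(data, cutoff, size=3):
--     # O(n): prefix sums of below-cutoff flags give each window's bad-count in O(1)
--     lookback = int(size/2)
--     n = len(data)
--     pre = [0]
--     for x in data:
--         pre.append(pre[-1] + (1 if x < cutoff else 0))
--     return [data[i]
--             if 0 <= i - lookback and i + lookback + 1 <= n
--                and pre[i + lookback + 1] - pre[i - lookback] == 0
--             else 0
--             for i in range(n)]
-- ===== Notes on version B (the rewrite author's own statement) =====
-- stated objective: faster
-- what changed: Replaces the per-point window slice with an all() scan (O(n*size)) by one prefix-sum array of below-cutoff flags, so each window check is a single O(1) range-sum comparison.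
-- outside the precondition, e.g. on sliding_window_mask([1, 2, 3], 2, -2): A returns [1, 2, 0], B returns [0, 2, 3]
import Mathlib
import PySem

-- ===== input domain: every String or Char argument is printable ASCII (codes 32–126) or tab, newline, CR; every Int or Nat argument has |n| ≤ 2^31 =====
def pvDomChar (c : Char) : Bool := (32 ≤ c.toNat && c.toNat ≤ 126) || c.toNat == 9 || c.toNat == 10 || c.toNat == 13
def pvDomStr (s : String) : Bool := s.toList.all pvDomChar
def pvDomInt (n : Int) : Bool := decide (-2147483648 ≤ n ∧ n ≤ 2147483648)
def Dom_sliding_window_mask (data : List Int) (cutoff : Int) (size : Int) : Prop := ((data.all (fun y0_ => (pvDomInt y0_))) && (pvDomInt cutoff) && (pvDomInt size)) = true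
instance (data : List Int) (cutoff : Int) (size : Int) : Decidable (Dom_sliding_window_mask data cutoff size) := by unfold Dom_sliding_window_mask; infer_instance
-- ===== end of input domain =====

-- B replaces A's per-point window scan by one prefix-sum array of below-cutoff flags (O(n) instead of O(n*size)); return value only, A returns a fresh list and mutates nothing.

-- ===== PORT A =====
def sliding_window_mask (data : List Int) (cutoff : Int) (size : Int) : List Int :=
  let lookback := PySem.Int.truncdiv size 2
  let masked := data
  let masked := (PySem.List.pyRange 0 lookback 1).foldl
    (fun m i => PySem.List.pySetD (PySem.List.pySetD m i 0) (-i - 1) 0) masked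
  (PySem.List.pyRange lookback ((data.length : Int) - lookback) 1).foldl
    (fun m i =>
      let window := PySem.List.slice data (some (i - lookback)) (some (i + lookback + 1))
      if ¬ (window.all (fun x => cutoff ≤ x)) then PySem.List.pySetD m i 0 else m) masked

-- ===== PORT B =====
def sliding_window_mask_alt (data : List Int) (cutoff : Int) (size : Int) : List Int :=
  let lookback := PySem.Int.truncdiv size 2
  let n : Int := data.length
  let pre : List Int := data.foldl
    (fun acc x => acc ++ [PySem.List.pyGetD acc (-1) 0 + (if x < cutoff then 1 else 0)]) [0]
  (PySem.List.pyRange 0 n 1).map (fun i =>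
    if 0 ≤ i - lookback ∧ i + lookback + 1 ≤ n ∧
       PySem.List.pyGetD pre (i + lookback + 1) 0 - PySem.List.pyGetD pre (i - lookback) 0 = 0
    then PySem.List.pyGetD data i 0 else 0)

-- ===== PRECONDITION & SPEC =====
-- Pre_ restricts to the natural domain: a nonnegative half-window that fits in the list.
-- A negative size is outside the task's natural domain (A's values there are an artefact of
-- Python's negative slice/index wraparound), and for lookback > len(data) A raises IndexError.
def Pre_sliding_window_mask (data : List Int) (cutoff : Int) (size : Int) : Prop :=
  0 ≤ PySem.Int.truncdiv size 2 ∧ PySem.Int.truncdiv size 2 ≤ (data.length : Int)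
instance (data : List Int) (cutoff : Int) (size : Int) : Decidable (Pre_sliding_window_mask data cutoff size) := by unfold Pre_sliding_window_mask; infer_instance
def pvWitness_sliding_window_mask : List Int × Int × Int := ([5, 1, 5, 5, 5, 5], 3, 3)

def Spec_sliding_window_mask (data : List Int) (cutoff : Int) (size : Int) (out : List Int) : Prop := out = sliding_window_mask_alt data cutoff size
instance (data : List Int) (cutoff : Int) (size : Int) (out : List Int) : Decidable (Spec_sliding_window_mask data cutoff size out) := by unfold Spec_sliding_window_mask; infer_instance

-- ===== CLAIM (what is proved, stated in full; the proofs are below) =====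
def Claim_equal_sliding_window_mask : Prop := ∀ (data : List Int) (cutoff : Int) (size : Int), Dom_sliding_window_mask data cutoff size → Pre_sliding_window_mask data cutoff size → Spec_sliding_window_mask data cutoff size (sliding_window_mask data cutoff size)


-- ===== LEMMAS AND PROOFS =====

lemma pv_pyIdx_neg (len k : Nat) (hk : k < len) :
    PySem.List.pyIdx? len (-(k : Int) - 1) = some (len - 1 - k) := by
  unfold PySem.List.pyIdx?
  have h1 : ¬ (0 ≤ -(k : Int) - 1) := by omega
  have h2 : -(len : Int) ≤ -(k : Int) - 1 := by omega
  simp only [if_neg h1, if_pos h2]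
  congr 1
  omega
lemma pv_pySetD_neg (xs : List Int) (k : Nat) (hk : k < xs.length) (v : Int) :
    PySem.List.pySetD xs (-(k : Int) - 1) v = xs.set (xs.length - 1 - k) v := by
  simp [PySem.List.pySetD, PySem.List.pySet?, pv_pyIdx_neg xs.length k hk]
lemma pv_phase1 (data : List Int) (L : Nat) (hL : L ≤ data.length) :
    (((List.range L).foldl
        (fun m (k : Nat) => PySem.List.pySetD (PySem.List.pySetD m (k : Int) 0) (-(k : Int) - 1) 0)
        data).length = data.length)
  ∧ ∀ j : Nat, j < data.length →
    ((List.range L).foldl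
        (fun m (k : Nat) => PySem.List.pySetD (PySem.List.pySetD m (k : Int) 0) (-(k : Int) - 1) 0)
        data)[j]?
      = if j < L ∨ data.length - L ≤ j then some 0 else data[j]? := by
  induction L with
  | zero => simp [List.range_zero]; intro j hj; intro h; omega
  | succ L ih =>
    have hL' : L ≤ data.length := by omega
    obtain ⟨ihlen, ihget⟩ := ih hL'
    rw [List.range_succ, List.foldl_append]
    set prev := (List.range L).foldl
        (fun m (k : Nat) => PySem.List.pySetD (PySem.List.pySetD m (k : Int) 0) (-(k : Int) - 1) 0)
        data with hprev
    simp only [List.foldl_cons, List.foldl_nil]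
    have hset1 : PySem.List.pySetD prev (L : Int) 0 = prev.set L 0 := by
      simp [PySem.List.pySetD_natCast]
    have hlen1 : (prev.set L 0).length = data.length := by simp [ihlen]
    have hset2 : PySem.List.pySetD (prev.set L 0) (-(L : Int) - 1) 0
        = (prev.set L 0).set (data.length - 1 - L) 0 := by
      rw [pv_pySetD_neg _ _ (by omega)]
      rw [hlen1]
    rw [hset1, hset2]
    constructor
    · simp [hlen1]
    · intro j hj
      rw [List.getElem?_set, List.getElem?_set]
      simp only [hlen1, ihlen]
      by_cases h1 : data.length - 1 - L = j
      · simp only [if_pos h1, if_pos (by omega : data.length - 1 - L < data.length)]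
        rw [if_pos (by omega)]
      · rw [if_neg h1]
        by_cases h2 : L = j
        · simp only [if_pos h2, if_pos (by omega : L < data.length)]
          rw [if_pos (by omega)]
        · rw [if_neg h2, ihget j hj]
          by_cases h3 : j < L ∨ data.length - L ≤ j
          · rw [if_pos h3, if_pos (by omega)]
          · rw [if_neg h3, if_neg (by omega)]

lemma pv_phase2 (data : List Int) (cond : Int → Bool) (a : Int) (ha : 0 ≤ a) (t : Nat)
    (m : List Int) (hm : m.length = data.length) :
    (((PySem.List.pyRange a (a + t) 1).foldl
        (fun m i => if ¬ (cond i) then PySem.List.pySetD m i 0 else m) m).length = data.length)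
  ∧ ∀ j : Nat, j < data.length →
    ((PySem.List.pyRange a (a + t) 1).foldl
        (fun m i => if ¬ (cond i) then PySem.List.pySetD m i 0 else m) m)[j]?
      = if a ≤ (j : Int) ∧ (j : Int) < a + t ∧ ¬ (cond (j : Int)) then some 0 else m[j]? := by
  induction t with
  | zero =>
    rw [show a + ((0:Nat):Int) = a by omega, PySem.List.pyRange_one_eq_nil (le_refl a)]
    simp only [List.foldl_nil]
    refine ⟨hm, fun j hj => ?_⟩
    rw [if_neg (by omega)]
  | succ t ih =>
    obtain ⟨ihlen, ihget⟩ := ih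
    rw [show a + ((t + 1 : Nat) : Int) = (a + t) + 1 by push_cast; ring,
        PySem.List.pyRange_one_succ_right (by omega), List.foldl_append]
    set prev := (PySem.List.pyRange a (a + t) 1).foldl
        (fun m i => if ¬ (cond i) then PySem.List.pySetD m i 0 else m) m with hprev
    simp only [List.foldl_cons, List.foldl_nil]
    by_cases hc : cond (a + (t : Int))
    · rw [if_neg (by simp [hc])]
      refine ⟨ihlen, fun j hj => ?_⟩
      rw [ihget j hj]
      by_cases h1 : a ≤ (j : Int) ∧ (j : Int) < a + t ∧ ¬ (cond (j : Int))
      · rw [if_pos h1, if_pos ⟨h1.1, by omega, h1.2.2⟩]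
      · rw [if_neg h1]
        by_cases h2 : a ≤ (j : Int) ∧ (j : Int) < a + t + 1 ∧ ¬ (cond (j : Int))
        · exfalso
          have hje : (j : Int) = a + t := by
            rcases h2 with ⟨x1, x2, x3⟩
            by_contra hne
            exact h1 ⟨x1, by omega, x3⟩
          rw [hje] at h2
          exact h2.2.2 hc
        · rw [if_neg h2]
    · rw [if_pos (by simp [hc])]
      have hset : PySem.List.pySetD prev (a + (t : Int)) 0 = prev.set (a + (t : Int)).toNat 0 :=
        PySem.List.pySetD_of_nonneg _ _ (by omega)
      rw [hset]
      refine ⟨by simp [ihlen], fun j hj => ?_⟩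
      rw [List.getElem?_set]
      by_cases h1 : (a + (t : Int)).toNat = j
      · rw [if_pos h1, if_pos (by rw [ihlen]; omega), if_pos ⟨by omega, by omega, by simp [show ((j:Int)) = a + t by omega, hc]⟩]
      · rw [if_neg h1, ihget j hj]
        by_cases h2 : a ≤ (j : Int) ∧ (j : Int) < a + t ∧ ¬ (cond (j : Int))
        · rw [if_pos h2, if_pos ⟨h2.1, by omega, h2.2.2⟩]
        · rw [if_neg h2, if_neg (by
            rintro ⟨x1, x2, x3⟩
            exact h2 ⟨x1, by omega, x3⟩)]

def pvGood (data : List Int) (cutoff lookback : Int) (i : Int) : Bool :=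
  (PySem.List.slice data (some (i - lookback)) (some (i + lookback + 1))).all
    (fun x => decide (cutoff ≤ x))

lemma pv_A_char (data : List Int) (cutoff size : Int)
    (h0 : 0 ≤ PySem.Int.truncdiv size 2) (hn : PySem.Int.truncdiv size 2 ≤ (data.length : Int)) :
    ((sliding_window_mask data cutoff size).length = data.length)
  ∧ ∀ j : Nat, j < data.length →
    (sliding_window_mask data cutoff size)[j]?
      = if PySem.Int.truncdiv size 2 ≤ (j : Int)
          ∧ (j : Int) + PySem.Int.truncdiv size 2 + 1 ≤ (data.length : Int)
          ∧ pvGood data cutoff (PySem.Int.truncdiv size 2) (j : Int)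
        then data[j]? else some 0 := by
  set lb := PySem.Int.truncdiv size 2 with hlb
  set L : Nat := lb.toNat with hLdef
  have hlbL : lb = (L : Int) := by omega
  have hLn : L ≤ data.length := by omega
  unfold sliding_window_mask
  rw [← hlb]
  simp only []
  rw [hlbL, PySem.List.pyRange_one]
  rw [show (((L : Int)) - 0).toNat = L by omega]
  rw [List.foldl_map]
  simp only [zero_add]
  set m1 := (List.range L).foldl
      (fun m (k : Nat) => PySem.List.pySetD (PySem.List.pySetD m (k : Int) 0) (-(k : Int) - 1) 0)
      data with hm1
  obtain ⟨h1len, h1get⟩ := pv_phase1 data L hLn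
  rw [← hm1] at h1len h1get
  by_cases hcase : (data.length : Int) - L ≤ L
  · rw [PySem.List.pyRange_one_eq_nil (by omega)]
    simp only [List.foldl_nil]
    refine ⟨h1len, fun j hj => ?_⟩
    rw [h1get j hj, if_pos (by omega), if_neg (by omega)]
  · set t : Nat := (data.length - 2 * L : Nat) with ht
    have hbt : (data.length : Int) - (L : Int) = (L : Int) + (t : Nat) := by
      push_cast; omega
    rw [hbt]
    obtain ⟨h2len, h2get⟩ := pv_phase2 data
      (fun i => (PySem.List.slice data (some (i - (L : Int))) (some (i + (L : Int) + 1))).all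
        (fun x => decide (cutoff ≤ x))) (L : Int) (by omega) t m1 h1len
    refine ⟨h2len, fun j hj => ?_⟩
    rw [h2get j hj]
    by_cases hgood : pvGood data cutoff (L : Int) (j : Int)
    · have hg' : ((PySem.List.slice data (some ((j : Int) - (L : Int))) (some ((j : Int) + (L : Int) + 1))).all
          (fun x => decide (cutoff ≤ x))) = true := by simpa [pvGood] using hgood
      rw [if_neg (by rintro ⟨x1, x2, x3⟩; exact x3 hg'), h1get j hj]
      by_cases hin : (L : Int) ≤ (j : Int) ∧ (j : Int) + (L : Int) + 1 ≤ (data.length : Int)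
      · rw [if_neg (show ¬ (j < L ∨ data.length - L ≤ j) by omega),
            if_pos ⟨hin.1, hin.2, hgood⟩]
      · rw [if_pos (show (j < L ∨ data.length - L ≤ j) by omega),
            if_neg (show ¬ _ by rintro ⟨x1, x2, x3⟩; exact hin ⟨x1, x2⟩)]
    · have hg' : ¬ ((PySem.List.slice data (some ((j : Int) - (L : Int))) (some ((j : Int) + (L : Int) + 1))).all
          (fun x => decide (cutoff ≤ x))) = true := by simpa [pvGood] using hgood
      by_cases hmid : (L : Int) ≤ (j : Int) ∧ (j : Int) < (L : Int) + ((t : Nat) : Int)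
      · rw [if_pos ⟨hmid.1, hmid.2, hg'⟩,
            if_neg (show ¬ _ by rintro ⟨x1, x2, x3⟩; exact hgood x3)]
      · rw [if_neg (show ¬ _ by rintro ⟨x1, x2, x3⟩; exact hmid ⟨x1, x2⟩), h1get j hj,
            if_pos (show (j < L ∨ data.length - L ≤ j) by omega),
            if_neg (show ¬ _ by rintro ⟨x1, x2, x3⟩; exact hgood x3)]

lemma pv_pyGetD_last (acc : List Int) (h : acc ≠ []) :
    PySem.List.pyGetD acc (-1) 0 = acc.getD (acc.length - 1) 0 := by
  have h1 := pv_pyIdx_neg acc.length 0 (by cases acc <;> simp_all)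
  norm_num at h1
  simp [PySem.List.pyGetD, PySem.List.pyGet?, h1]
def pvC (data : List Int) (cutoff : Int) (k : Nat) : Int :=
  ((data.take k).countP (fun x => decide (x < cutoff)) : Int)

lemma pv_pre_aux (cutoff : Int) (ds : List Int) : ∀ (acc : List Int), acc ≠ [] →
    ds.foldl (fun acc x => acc ++ [PySem.List.pyGetD acc (-1) 0 + (if x < cutoff then 1 else 0)]) acc
      = acc ++ (List.range ds.length).map
          (fun k => acc.getD (acc.length - 1) 0 + ((ds.take (k + 1)).countP (fun x => decide (x < cutoff)) : Int)) := by
  induction ds with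
  | nil => intro acc h; simp
  | cons x ds ih =>
    intro acc hacc
    rw [List.foldl_cons, pv_pyGetD_last acc hacc]
    set v : Int := acc.getD (acc.length - 1) 0 + (if x < cutoff then 1 else 0) with hv
    rw [ih (acc ++ [v]) (by simp)]
    have hlast : (acc ++ [v]).getD ((acc ++ [v]).length - 1) 0 = v := by
      simp
    rw [hlast, List.append_assoc]
    congr 1
    rw [List.length_cons, List.range_succ_eq_map]
    simp only [List.map_cons, List.map_map, List.singleton_append]
    congr 1
    · by_cases hx : x < cutoff <;> simp [hv, hx]
    · refine List.map_congr_left (fun k hk => ?_)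
      simp only [Function.comp, hv, List.take_succ_cons, List.countP_cons]
      by_cases hx : x < cutoff <;> simp [hx] <;> push_cast <;> ring
lemma pv_pre_spec (data : List Int) (cutoff : Int) :
    data.foldl (fun acc x => acc ++ [PySem.List.pyGetD acc (-1) 0 + (if x < cutoff then 1 else 0)]) [0]
      = (List.range (data.length + 1)).map (fun k => pvC data cutoff k) := by
  rw [pv_pre_aux cutoff data [0] (by simp), List.range_succ_eq_map]
  simp [pvC, Function.comp]


lemma pv_B_char (data : List Int) (cutoff size : Int) :
    ((sliding_window_mask_alt data cutoff size).length = data.length)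
  ∧ ∀ j : Nat, j < data.length →
    (sliding_window_mask_alt data cutoff size)[j]?
      = some (if 0 ≤ (j : Int) - PySem.Int.truncdiv size 2
              ∧ (j : Int) + PySem.Int.truncdiv size 2 + 1 ≤ (data.length : Int)
              ∧ PySem.List.pyGetD ((List.range (data.length + 1)).map (fun k => pvC data cutoff k)) ((j : Int) + PySem.Int.truncdiv size 2 + 1) 0
                - PySem.List.pyGetD ((List.range (data.length + 1)).map (fun k => pvC data cutoff k)) ((j : Int) - PySem.Int.truncdiv size 2) 0 = 0
              then PySem.List.pyGetD data (j : Int) 0 else 0) := by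
  unfold sliding_window_mask_alt
  simp only []
  rw [PySem.List.pyRange_one]
  constructor
  · simp
  · intro j hj
    rw [List.map_map, List.getElem?_map,
        List.getElem?_range (by simpa using hj : j < ((data.length : Int) - 0).toNat)]
    simp only [Option.map_some, Function.comp_apply, zero_add]
    rw [pv_pre_spec data cutoff]

lemma pv_cond_iff (data : List Int) (cutoff : Int) (L j : Nat) (hLj : L ≤ j) :
    (pvC data cutoff (j + L + 1) - pvC data cutoff (j - L) = 0)
      ↔ pvGood data cutoff (L : Int) (j : Int) = true := by
  have hslice : PySem.List.slice data (some ((j : Int) - (L : Int))) (some ((j : Int) + (L : Int) + 1))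
      = (data.drop (j - L)).take (2 * L + 1) := by
    rw [show ((j : Int) - (L : Int)) = ((j - L : Nat) : Int) by omega,
        show ((j : Int) + (L : Int) + 1) = ((j + L + 1 : Nat) : Int) by push_cast; ring,
        PySem.List.slice_natCast]
    congr 1
    omega
  have hsplit : pvC data cutoff (j + L + 1)
      = pvC data cutoff (j - L) + (((data.drop (j - L)).take (2 * L + 1)).countP (fun x => decide (x < cutoff)) : Int) := by
    unfold pvC
    rw [show j + L + 1 = (j - L) + (2 * L + 1) by omega, List.take_add, List.countP_append]
    push_cast; ring
  rw [hsplit]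
  unfold pvGood
  rw [hslice]
  constructor
  · intro h
    have hz : ((data.drop (j - L)).take (2 * L + 1)).countP (fun x => decide (x < cutoff)) = 0 := by omega
    rw [List.countP_eq_zero] at hz
    simp only [List.all_eq_true]
    intro x hx
    have := hz x hx
    simp only [decide_eq_true_eq] at this ⊢
    omega
  · intro h
    have hz : ((data.drop (j - L)).take (2 * L + 1)).countP (fun x => decide (x < cutoff)) = 0 := by
      rw [List.countP_eq_zero]
      simp only [List.all_eq_true] at h
      intro x hx
      have := h x hx
      simp only [decide_eq_true_eq] at this ⊢
      omega
    omega

-- ===== VERDICT (by name: the statement is the Claim_ definition above) =====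
theorem sliding_window_mask_spec : Claim_equal_sliding_window_mask := by
  intro data cutoff size hdom hpre
  unfold Spec_sliding_window_mask
  unfold Pre_sliding_window_mask at hpre
  obtain ⟨h0, hn⟩ := hpre
  set lb := PySem.Int.truncdiv size 2 with hlb
  set L : Nat := lb.toNat with hL
  have hlbL : lb = (L : Int) := by omega
  obtain ⟨hAlen, hAget⟩ := pv_A_char data cutoff size h0 hn
  obtain ⟨hBlen, hBget⟩ := pv_B_char data cutoff size
  apply List.ext_getElem?
  intro j
  by_cases hj : j < data.length
  · rw [hAget j hj, hBget j hj]
    by_cases hc : lb ≤ (j : Int) ∧ (j : Int) + lb + 1 ≤ (data.length : Int)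
    · have e1 : ((j : Int) + lb + 1) = ((j + L + 1 : Nat) : Int) := by push_cast; omega
      have e2 : ((j : Int) - lb) = ((j - L : Nat) : Int) := by push_cast; omega
      rw [e1, e2, PySem.List.pyGetD_natCast, PySem.List.pyGetD_natCast,
          PySem.List.getD_map_range _ _ _ _ (by omega), PySem.List.getD_map_range _ _ _ _ (by omega),
          PySem.List.pyGetD_natCast]
      have hiff := pv_cond_iff data cutoff L j (by omega)
      by_cases hg : pvGood data cutoff lb (j : Int)
      · have hg' : pvGood data cutoff (L : Int) (j : Int) = true := by rw [← hlbL]; exact hg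
        rw [if_pos ⟨hc.1, by rw [← e1]; exact hc.2, hg⟩,
            if_pos ⟨by omega, by rw [← e1]; exact hc.2, hiff.mpr hg'⟩,
            List.getElem?_eq_getElem hj, List.getD_eq_getElem data 0 hj]
      · have hg' : ¬ pvGood data cutoff (L : Int) (j : Int) = true := by rw [← hlbL]; exact hg
        rw [if_neg (by rintro ⟨x1, x2, x3⟩; exact hg x3),
            if_neg (by rintro ⟨x1, x2, x3⟩; exact hg' (hiff.mp x3))]
    · rw [if_neg (by rintro ⟨x1, x2, x3⟩; exact hc ⟨x1, x2⟩),
          if_neg (by rintro ⟨x1, x2, x3⟩; exact hc ⟨by omega, x2⟩)]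
  · rw [List.getElem?_eq_none (by omega), List.getElem?_eq_none (by omega)]
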